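-- pv_equiv track=rewrite | github.com/Ryan-0625/AI-Novels | src/deepnovel/agents/hook_generator.py | _extract_param
-- ===== SOURCE A (Python) =====
-- def _extract_param(content: str, param: str, default: str = "") -> str:
--     """从内容提取参数"""
--     pattern = f"{param}="
--     if pattern in content:
--         try:
--             start = content.index(pattern) + len(pattern)
--             end = start
--             while end < len(content) and content[end] not in " ,;":
--                 end += 1
--             return content[start:end]
--         except ValueError:
--             return default
--     return default
-- ===== SOURCE B (Python) =====
-- def _extract_param(content: str, param: str, default: str = "") -> str:
--     """Partition on 'param=' and cut the remainder at the nearest delimiter found with str.find."""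
--     _, sep, rest = content.partition(param + "=")
--     if not sep:
--         return default
--     end = len(rest)
--     for d in " ,;":
--         i = rest.find(d)
--         if 0 <= i < end:
--             end = i
--     return rest[:end]
-- ===== Notes on version B (the rewrite author's own statement) =====
-- stated objective: idiomatic
-- what changed: Replaces the membership-test-plus-index and the manual character-scan while loop by str.partition on 'param=' and cutting the remainder at the minimum str.find position of the three delimiters.
import Mathlib
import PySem

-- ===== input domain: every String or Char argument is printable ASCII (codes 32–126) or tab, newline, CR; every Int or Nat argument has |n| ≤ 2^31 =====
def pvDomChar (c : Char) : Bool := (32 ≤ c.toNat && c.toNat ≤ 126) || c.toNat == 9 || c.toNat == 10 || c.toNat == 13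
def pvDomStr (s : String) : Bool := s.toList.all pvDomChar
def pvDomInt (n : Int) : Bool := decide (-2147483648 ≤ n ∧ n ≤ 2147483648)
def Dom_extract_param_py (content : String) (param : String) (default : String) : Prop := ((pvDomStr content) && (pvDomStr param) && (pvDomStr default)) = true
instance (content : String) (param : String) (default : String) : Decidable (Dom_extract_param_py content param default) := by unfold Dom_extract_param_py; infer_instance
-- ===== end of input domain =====

-- B replaces A's membership test + index + manual character-scan loop by partition on 'param=' and cutting at the minimum find position of the three delimiters (idiomatic; no speed claim).

-- ===== PORT A =====
-- the 'while end < len(content) and content[end] not in " ,;"' scan, advancing end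
def pvScanA (c : List Char) (e : Nat) : Nat :=
  if h : e < c.length then
    if [' ', ',', ';'].contains (c.get ⟨e, h⟩) then e else pvScanA c (e + 1)
  else e
termination_by c.length - e

def extract_param_py (content : String) (param : String) (default : String) : String :=
  let c := content.toList
  let pattern := param.toList ++ ['=']          -- f"{param}="
  if PySem.Chars.isIn pattern c then
    -- content.index(pattern) cannot raise here (the membership test just succeeded), so the except branch is dead
    let start := (PySem.Chars.find c pattern).toNat + pattern.length
    let e := pvScanA c start
    String.ofList (PySem.List.slice c (some (start : Int)) (some (e : Int)))
  else default

-- ===== PORT B =====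
def extract_param_py_alt (content : String) (param : String) (default : String) : String :=
  let c := content.toList
  let pat := param.toList ++ ['=']
  -- content.partition(pat): ported by hand as find + drop (exact: sep is nonempty iff pat occurs, rest = text after the first occurrence)
  let i := PySem.Chars.find c pat
  if i = -1 then default
  else
    let rest := c.drop (i.toNat + pat.length)
    let endIdx := [' ', ',', ';'].foldl
      (fun e d =>
        let j := PySem.Chars.find rest [d]
        if 0 ≤ j ∧ j < e then j else e)
      (rest.length : Int)
    String.ofList (PySem.List.slice rest none (some endIdx))   -- rest[:end]

-- ===== PRECONDITION & SPEC =====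
def Spec_extract_param_py (content : String) (param : String) (default : String) (out : String) : Prop := out = extract_param_py_alt content param default
instance (content : String) (param : String) (default : String) (out : String) : Decidable (Spec_extract_param_py content param default out) := by unfold Spec_extract_param_py; infer_instance

-- ===== CLAIM (what is proved, stated in full; the proofs are below) =====
def Claim_equal_extract_param_py : Prop := ∀ (content : String) (param : String) (default : String), Dom_extract_param_py content param default → Spec_extract_param_py content param default (extract_param_py content param default)

-- ===== LEMMAS AND PROOFS =====

def pvDelim (ch : Char) : Bool := [' ', ',', ';'].contains ch

-- A's scan from e returns e plus the index of the first delimiter in c.drop e (length of the drop if none)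
theorem pvScanA_eq (c : List Char) (e : Nat) :
    pvScanA c e = e + List.findIdx pvDelim (c.drop e) := by
  unfold pvScanA
  split
  · next h =>
    rw [List.drop_eq_getElem_cons h, List.findIdx_cons]
    by_cases hd : pvDelim (c.get ⟨e, h⟩)
    · have hb : pvDelim (getElem c e h) = true := by simpa using hd
      rw [if_pos (by simpa [pvDelim] using hd)]
      simp [hb]
    · have hb : pvDelim (getElem c e h) = false := by
        simpa using hd
      rw [if_neg (by simpa [pvDelim] using hd), pvScanA_eq c (e + 1)]
      simp only [hb, Bool.cond_false]
      omega
  · next h =>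
    rw [List.drop_eq_nil_of_le (by omega)]
    simp
termination_by c.length - e

-- a singleton find is the findIdx of that character when present, -1 when absent
theorem find_singleton (l : List Char) (d : Char) :
    PySem.Chars.find l [d] = if d ∈ l then (List.findIdx (· == d) l : Int) else -1 := by
  by_cases hm : d ∈ l
  · have hinf : [d] <:+: l := by
      obtain ⟨s, t, rfl⟩ := List.append_of_mem hm
      exact ⟨s, t, by simp⟩
    have h0 : 0 ≤ PySem.Chars.find l [d] := by
      rw [PySem.Chars.find_nonneg_iff]; exact hinf
    obtain ⟨hpre, hmin⟩ := PySem.Chars.find_spec (s := l) (sub := [d]) h0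
    have hlt : (PySem.Chars.find l [d]).toNat < l.length := by
      by_contra hge
      rw [Nat.not_lt] at hge
      rw [List.drop_eq_nil_of_le hge] at hpre
      simp at hpre
    rw [if_pos hm]
    have : List.findIdx (· == d) l = (PySem.Chars.find l [d]).toNat := by
      rw [List.findIdx_eq hlt]
      constructor
      · have h1 := hpre
        rw [List.drop_eq_getElem_cons hlt, List.cons_prefix_cons] at h1
        simp only [beq_iff_eq]
        exact h1.1.symm
      · intro j hj
        have h2 := hmin j hj
        rw [List.drop_eq_getElem_cons (by omega), List.cons_prefix_cons] at h2
        simp at h2 ⊢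
        exact fun he => h2 he.symm
    omega
  · rw [if_neg hm, PySem.Chars.find_eq_neg_one_iff]
    intro hinf
    exact hm (hinf.mem (by simp))

-- findIdx of a disjunction of tests is the min of the two findIdx
theorem findIdx_or (p q : Char → Bool) (l : List Char) :
    List.findIdx (fun x => p x || q x) l = min (List.findIdx p l) (List.findIdx q l) := by
  induction l with
  | nil => simp
  | cons x xs ih =>
    simp only [List.findIdx_cons]
    cases p x <;> cases q x <;> simp only [Bool.or_self, Bool.or_false, Bool.or_true, Bool.cond_true, Bool.cond_false, ih] <;> omega

theorem pvDelim_eq : pvDelim = fun x => (x == ' ' || (x == ',' || x == ';')) := by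
  funext x
  simp only [pvDelim, List.contains_cons, List.contains_nil, Bool.or_false]

-- B's three-step fold over the delimiters computes the findIdx of the delimiter predicate
theorem pvFoldB_eq (rest : List Char) :
    ([' ', ',', ';'].foldl
      (fun e d =>
        let j := PySem.Chars.find rest [d]
        if 0 ≤ j ∧ j < e then j else e)
      (rest.length : Int)) = (List.findIdx pvDelim rest : Int) := by
  have step : ∀ (e : Int) (d : Char), 0 ≤ e → e ≤ (rest.length : Int) →
      (let j := PySem.Chars.find rest [d]
       if 0 ≤ j ∧ j < e then j else e) = min e (List.findIdx (· == d) rest : Int) := by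
    intro e d he0 heL
    simp only [find_singleton]
    by_cases hm : d ∈ rest
    · have h0 : (0 : Int) ≤ (List.findIdx (· == d) rest : Int) := by positivity
      simp only [if_pos hm]
      split_ifs with h <;> omega
    · have hlen : List.findIdx (· == d) rest = rest.length := by
        rw [List.findIdx_eq_length]
        intro x hx
        simp
        rintro rfl
        exact hm hx
      simp only [if_neg hm, hlen]
      split_ifs with h <;> omega
  have h1 := List.findIdx_le_length (p := (· == ' ')) (xs := rest)
  have h2 := List.findIdx_le_length (p := (· == ',')) (xs := rest)
  have h3 := List.findIdx_le_length (p := (· == ';')) (xs := rest)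
  rw [pvDelim_eq, findIdx_or, findIdx_or]
  simp only [List.foldl_cons, List.foldl_nil]
  rw [step _ ' ' (by positivity) (by omega)]
  rw [step _ ',' (by omega) (by omega)]
  rw [step _ ';' (by omega) (by omega)]
  omega

theorem extract_param_eq (content param default : String) :
    extract_param_py content param default = extract_param_py_alt content param default := by
  unfold extract_param_py extract_param_py_alt
  by_cases hf : PySem.Chars.find content.toList (param.toList ++ ['=']) = -1
  · rw [if_neg, if_pos hf]
    rw [Bool.not_eq_true, PySem.Chars.isIn_eq_false_iff, ← PySem.Chars.find_eq_neg_one_iff]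
    exact hf
  · rw [if_pos, if_neg hf]
    · simp only [pvFoldB_eq, pvScanA_eq, PySem.List.slice_to_natCast, PySem.List.slice_natCast]
      simp
    · rw [← Bool.not_eq_false, PySem.Chars.isIn_eq_false_iff, ← PySem.Chars.find_eq_neg_one_iff]
      simpa using hf

-- ===== VERDICT (by name: the statement is the Claim_ definition above) =====
theorem extract_param_py_spec : Claim_equal_extract_param_py := by
  intro content param default _
  unfold Spec_extract_param_py
  exact extract_param_eq content param default
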